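-- pv_equiv track=rewrite | github.com/MrL314/Project-L | Tools/as65c/SOURCE_CODE/as65c/helpers.py | size_to_bytes
-- ===== SOURCE A (Python) =====
-- def size_to_bytes(size):
-- 	"""Converts the number for a size into the REL format for size."""
--
-- 	if size < 0x80:
-- 		# if smaller than 0x80 bytes, set "small size" bit of size
-- 		return [size | 0x80]
--
-- 	else:
-- 		# if larger than 0x80 bytes, convert into size_len+size format
--
-- 		num_bytes = 0
--
-- 		size_bytes = []
--
-- 		while size != 0:
-- 			size_bytes.append(size % 256)
-- 			size = size // 256
-- 			num_bytes += 1
--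
-- 		if num_bytes > 0x7f:
-- 			raise
--
-- 		return size_bytes
-- ===== SOURCE B (Python) =====
-- def size_to_bytes(size):
--     """Converts the number for a size into the REL format for size."""
--     if size < 0x80:
--         # small size: set "small size" bit
--         return [size | 0x80]
--     else:
--         # closed-form byte count, then little-endian serialization
--         num_bytes = (size.bit_length() + 7) // 8
--         if num_bytes > 0x7f:
--             raise
--         return list(size.to_bytes(num_bytes, 'little'))
-- ===== Notes on version B (the rewrite author's own statement) =====
-- stated objective: idiomatic
-- what changed: Replaced the repeated div/mod accumulation loop by a closed-form byte count from bit_length plus a single little-endian to_bytes serialization.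
import Mathlib
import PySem

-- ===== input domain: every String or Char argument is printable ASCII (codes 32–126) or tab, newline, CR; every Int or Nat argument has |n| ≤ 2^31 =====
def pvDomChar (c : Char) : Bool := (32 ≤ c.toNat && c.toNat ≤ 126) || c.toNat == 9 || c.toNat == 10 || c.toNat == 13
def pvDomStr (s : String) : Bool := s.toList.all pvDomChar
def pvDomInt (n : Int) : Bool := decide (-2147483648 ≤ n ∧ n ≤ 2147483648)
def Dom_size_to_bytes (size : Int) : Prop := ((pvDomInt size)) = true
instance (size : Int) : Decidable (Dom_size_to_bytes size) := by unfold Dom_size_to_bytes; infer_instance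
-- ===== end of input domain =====

-- B replaces A's div/mod accumulation loop by a closed-form byte count (bit_length) plus a
-- single little-endian to_bytes serialization (objective: idiomatic; not claimed faster).

-- ===== PORT A =====
-- the `while size != 0` loop, returning (size_bytes, num_bytes); the `0 < size` guard is only
-- for totality (the loop is entered with size ≥ 0x80, and Python's loop never terminates for
-- negative size, which is unreachable)
def szLoop (size : Int) : List Int × Int :=
  if h : 0 < size then
    let r := szLoop (PySem.Int.floordiv size 256)
    (PySem.Int.mod size 256 :: r.1, r.2 + 1)
  else ([], 0)
termination_by size.toNat
decreasing_by
  have h1 : PySem.Int.floordiv size 256 = size / 256 :=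
    PySem.Int.floordiv_eq_ediv_of_pos (by norm_num)
  rw [h1]; omega

def size_to_bytes (size : Int) : List Int :=
  if size < 0x80 then [PySem.Int.bor size 0x80]
  else
    let r := szLoop size
    if r.2 > 0x7f then []   -- Python: bare `raise`; unreachable on Dom (at most 4 bytes)
    else r.1

-- ===== PORT B =====
-- list(size.to_bytes(k, 'little')): k little-endian bytes
def toBytesLE (k : Nat) (n : Int) : List Int :=
  match k with
  | 0 => []
  | Nat.succ k => PySem.Int.mod n 256 :: toBytesLE k (PySem.Int.floordiv n 256)

def size_to_bytes_alt (size : Int) : List Int :=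
  if size < 0x80 then [PySem.Int.bor size 0x80]
  else
    let numBytes : Int := PySem.Int.floordiv ((PySem.Int.bitLength size : Int) + 7) 8
    if numBytes > 0x7f then []   -- Python: bare `raise`; unreachable on Dom
    else toBytesLE numBytes.toNat size

-- ===== PRECONDITION & SPEC =====
def Spec_size_to_bytes (size : Int) (out : List Int) : Prop := out = size_to_bytes_alt size
instance (size : Int) (out : List Int) : Decidable (Spec_size_to_bytes size out) := by unfold Spec_size_to_bytes; infer_instance

-- ===== CLAIM (what is proved, stated in full; the proofs are below) =====
def Claim_equal_size_to_bytes : Prop := ∀ (size : Int), Dom_size_to_bytes size → Spec_size_to_bytes size (size_to_bytes size)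

-- ===== LEMMAS AND PROOFS =====

-- A's loop on a Nat input, for reasoning
def natBytes : Nat → List Nat
  | 0 => []
  | (m+1) => ((m+1) % 256) :: natBytes ((m+1) / 256)

lemma szLoop_natCast (m : Nat) :
    szLoop (m : Int) = ((natBytes m).map Int.ofNat, ((natBytes m).length : Int)) := by
  induction m using Nat.strong_induction_on with
  | _ m ih =>
    match m with
    | 0 => simp [szLoop, natBytes]
    | (m+1) =>
      rw [szLoop]
      have hpos : (0:Int) < ((m+1 : Nat) : Int) := by exact_mod_cast Nat.succ_pos m
      rw [dif_pos hpos]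
      have hdiv : PySem.Int.floordiv ((m+1 : Nat) : Int) 256 = (((m+1) / 256 : Nat) : Int) := by
        exact_mod_cast PySem.Int.floordiv_natCast (m+1) 256
      have hmod : PySem.Int.mod ((m+1 : Nat) : Int) 256 = (((m+1) % 256 : Nat) : Int) := by
        exact_mod_cast PySem.Int.mod_natCast (m+1) 256
      rw [hdiv, hmod, ih ((m+1)/256) (Nat.div_lt_self (Nat.succ_pos m) (by norm_num))]
      simp [natBytes]

lemma natBytes_length_pos {m : Nat} (hm : 0 < m) : 0 < (natBytes m).length := by
  match m with
  | (m+1) => simp [natBytes]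

-- loop invariant: the byte count brackets m between powers of 256
lemma natBytes_brackets (m : Nat) (hm : 0 < m) :
    256 ^ ((natBytes m).length - 1) ≤ m ∧ m < 256 ^ (natBytes m).length := by
  induction m using Nat.strong_induction_on with
  | _ m ih =>
    match m with
    | (m+1) =>
      by_cases hlt : m + 1 < 256
      · have : (m+1) / 256 = 0 := Nat.div_eq_of_lt hlt
        simp [natBytes, this]
        omega
      · have hpos : 0 < (m+1) / 256 := Nat.div_pos (by omega) (by norm_num)
        obtain ⟨h1, h2⟩ := ih ((m+1)/256) (Nat.div_lt_self (Nat.succ_pos m) (by norm_num)) hpos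
        have hlp := natBytes_length_pos hpos
        set d := (natBytes ((m+1)/256)).length with hd
        have hlen : (natBytes (m+1)).length = d + 1 := by simp [natBytes, hd]
        rw [hlen]
        constructor
        · have : 256 ^ (d - 1) * 256 ≤ ((m+1)/256) * 256 := Nat.mul_le_mul_right _ h1
          have h256 : ((m+1)/256) * 256 ≤ m + 1 := Nat.div_mul_le_self _ _
          have hpow : 256 ^ (d + 1 - 1) = 256 ^ (d - 1) * 256 := by
            have hdd : d - 1 + 1 = d := Nat.succ_pred_eq_of_pos hlp
            rw [Nat.add_sub_cancel]
            conv_lhs => rw [← hdd]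
            rw [pow_succ]
          omega
        · have : (m+1)/256 + 1 ≤ 256 ^ d := h2
          have h3 : m + 1 < ((m+1)/256 + 1) * 256 := by
            have hdm := Nat.div_add_mod (m+1) 256
            have hmlt : (m+1) % 256 < 256 := Nat.mod_lt _ (by norm_num)
            omega
          calc m + 1 < ((m+1)/256 + 1) * 256 := h3
          _ ≤ 256 ^ d * 256 := Nat.mul_le_mul_right _ this
          _ = 256 ^ (d + 1) := (pow_succ 256 d).symm

-- the closed-form byte count equals the loop's count
lemma natBytes_length_eq (m : Nat) (hm : 0 < m) :
    (natBytes m).length = (PySem.Int.bitLength (m : Int) + 7) / 8 := by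
  obtain ⟨h1, h2⟩ := natBytes_brackets m hm
  have hlp := natBytes_length_pos hm
  set d := (natBytes m).length with hd
  set L := PySem.Int.bitLength (m : Int) with hL
  have habs : ((m : Int)).natAbs = m := Int.natAbs_natCast m
  have hub : m < 2 ^ L := by have := PySem.Int.lt_two_pow_bitLength (m : Int); rwa [habs] at this
  have hlb : 2 ^ (L - 1) ≤ m := by
    have hne : ((m : Int)) ≠ 0 := by exact_mod_cast hm.ne'
    have := PySem.Int.two_pow_bitLength_le (m : Int) hne
    rwa [habs] at this
  have hLpos : 0 < L := by
    by_contra h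
    have : L = 0 := by omega
    rw [this] at hub; simp at hub; omega
  -- d - 1 < L/8-bracket comparisons via powers of 2
  have h256 : (256 : Nat) = 2 ^ 8 := by norm_num
  have hA : 2 ^ (8 * (d - 1)) ≤ m := by
    calc 2 ^ (8 * (d - 1)) = (2 ^ 8) ^ (d - 1) := by rw [pow_mul]
    _ = 256 ^ (d - 1) := by rw [h256]
    _ ≤ m := h1
  have hB : m < 2 ^ (8 * d) := by
    calc m < 256 ^ d := h2
    _ = (2 ^ 8) ^ d := by rw [h256]
    _ = 2 ^ (8 * d) := by rw [pow_mul]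
  -- 8(d-1) < L from 2^(8(d-1)) ≤ m < 2^L
  have hc1 : 8 * (d - 1) < L :=
    (Nat.pow_lt_pow_iff_right (a := 2) one_lt_two).mp (lt_of_le_of_lt hA hub)
  -- L - 1 < 8d from 2^(L-1) ≤ m < 2^(8d)
  have hc2 : L - 1 < 8 * d :=
    (Nat.pow_lt_pow_iff_right (a := 2) one_lt_two).mp (lt_of_le_of_lt hlb hB)
  omega

-- B's serializer agrees with A's byte list when given the loop's length
lemma toBytesLE_natBytes : ∀ (k : Nat) (m : Nat), (natBytes m).length = k →
    toBytesLE k (m : Int) = (natBytes m).map Int.ofNat := by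
  intro k
  induction k with
  | zero =>
    intro m hlen
    match m with
    | 0 => simp [toBytesLE, natBytes]
    | (m+1) => simp [natBytes] at hlen
  | succ k ih =>
    intro m hlen
    match m with
    | 0 => simp [natBytes] at hlen
    | (m+1) =>
      simp only [natBytes, List.length_cons, Nat.succ.injEq] at hlen
      have hdiv : PySem.Int.floordiv ((m+1 : Nat) : Int) 256 = (((m+1) / 256 : Nat) : Int) := by
        exact_mod_cast PySem.Int.floordiv_natCast (m+1) 256
      have hmod : PySem.Int.mod ((m+1 : Nat) : Int) 256 = (((m+1) % 256 : Nat) : Int) := by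
        exact_mod_cast PySem.Int.mod_natCast (m+1) 256
      simp only [toBytesLE, hdiv, hmod, ih ((m+1)/256) hlen, natBytes, List.map_cons]
      rfl

-- ===== VERDICT (by name: the statement is the Claim_ definition above) =====
theorem size_to_bytes_spec : Claim_equal_size_to_bytes := by
  intro size hdom
  unfold Spec_size_to_bytes size_to_bytes size_to_bytes_alt
  by_cases hsmall : size < 0x80
  · rw [if_pos hsmall, if_pos hsmall]
  · rw [if_neg hsmall, if_neg hsmall]
    have hnn : (0:Int) ≤ size := by omega
    obtain ⟨m, rfl⟩ : ∃ m : Nat, size = (m : Int) := ⟨size.toNat, (Int.toNat_of_nonneg hnn).symm⟩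
    have hm : 128 ≤ m := by exact_mod_cast not_lt.mp hsmall
    have hmpos : 0 < m := by omega
    have hbound : m ≤ 2147483648 := by
      have : (m : Int) ≤ 2147483648 := by
        simp [Dom_size_to_bytes, pvDomInt] at hdom; exact_mod_cast hdom
      exact_mod_cast this
    -- byte count is at most 4 on Dom
    obtain ⟨h1, _⟩ := natBytes_brackets m hmpos
    have hd4 : (natBytes m).length ≤ 4 := by
      by_contra h
      have h5 : 5 ≤ (natBytes m).length := by omega
      have : 256 ^ 4 ≤ 256 ^ ((natBytes m).length - 1) :=
        Nat.pow_le_pow_right (by norm_num) (by omega)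
      omega
    have hlen := natBytes_length_eq m hmpos
    set L := PySem.Int.bitLength (m : Int) with hL
    -- A side
    rw [szLoop_natCast m]
    have hA2 : ¬ (((natBytes m).length : Int) > 0x7f) := by
      push Not; exact_mod_cast by omega
    rw [if_neg hA2]
    -- B side
    have hnum : PySem.Int.floordiv ((L : Int) + 7) 8 = (((L + 7) / 8 : Nat) : Int) := by
      have : ((L : Int) + 7) = ((L + 7 : Nat) : Int) := by push_cast; ring
      rw [this]; exact_mod_cast PySem.Int.floordiv_natCast (L + 7) 8
    rw [hnum]
    have hB2 : ¬ ((((L + 7) / 8 : Nat) : Int) > 0x7f) := by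
      push Not
      have : (L + 7) / 8 ≤ 4 := by rw [← hlen]; exact hd4
      exact_mod_cast by omega
    rw [if_neg hB2]
    have htn : (((L + 7) / 8 : Nat) : Int).toNat = (L + 7) / 8 := Int.toNat_natCast _
    rw [htn]
    exact (toBytesLE_natBytes ((L+7)/8) m hlen).symm
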